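-- pv_equiv track=rewrite | github.com/DylPickle13/EnGem | history.py | _find_latest_speaker_index
-- ===== SOURCE A (Python) =====
-- from typing import List, Dict, Optional
--
-- def _find_latest_speaker_index(messages: List[Dict[str, Optional[str]]], speaker: str) -> int:
--     target_speaker = (speaker or "").strip().lower()
--     if not target_speaker:
--         return -1
--
--     for idx in range(len(messages) - 1, -1, -1):
--         current_speaker = (messages[idx].get("speaker") or "").strip().lower()
--         if current_speaker == target_speaker:
--             return idx
--     return -1
-- ===== SOURCE B (Python) =====
-- def _find_latest_speaker_index(messages, speaker):
--     target_speaker = (speaker or "").strip().lower()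
--     if not target_speaker:
--         return -1
--
--     result = -1
--     for idx, message in enumerate(messages):
--         current_speaker = (message.get("speaker") or "").strip().lower()
--         if current_speaker == target_speaker:
--             result = idx
--     return result
-- ===== Notes on version B (the rewrite author's own statement) =====
-- stated objective: alternative
-- what changed: Replaces the backward index scan with early return by a single forward enumerate pass that overwrites the result on each match and returns it after the loop.
import Mathlib
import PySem

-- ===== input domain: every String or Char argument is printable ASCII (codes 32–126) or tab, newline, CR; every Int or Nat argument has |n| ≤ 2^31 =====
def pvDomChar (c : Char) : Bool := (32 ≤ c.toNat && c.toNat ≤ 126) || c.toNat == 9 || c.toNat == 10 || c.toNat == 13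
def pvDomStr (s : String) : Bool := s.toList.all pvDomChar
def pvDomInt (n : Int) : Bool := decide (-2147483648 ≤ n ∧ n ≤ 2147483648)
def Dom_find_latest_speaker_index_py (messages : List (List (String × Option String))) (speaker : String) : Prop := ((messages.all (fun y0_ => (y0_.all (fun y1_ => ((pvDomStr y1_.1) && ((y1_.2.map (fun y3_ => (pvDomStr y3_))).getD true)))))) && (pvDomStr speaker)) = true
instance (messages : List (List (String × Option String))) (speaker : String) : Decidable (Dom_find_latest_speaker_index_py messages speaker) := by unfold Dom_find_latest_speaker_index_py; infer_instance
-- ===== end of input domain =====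

-- B changes the decomposition: a single forward pass that overwrites the result on each match,
-- instead of A's backward scan with early return. Equivalence is proved for the return value.

-- normalization shared by both Pythons, character for character:
-- (msg.get("speaker") or "").strip().lower()
def pvNorm (msg : List (String × Option String)) : String :=
  PySem.Str.lower (PySem.Str.strip ((((PySem.Dict.mk msg).get? "speaker").getD none).getD ""))

-- ===== PORT A =====
-- A's loop body over range(len(messages)-1, -1, -1); pyGetD with default [] is exact here
-- because every index produced by the range is in bounds.
def pvLoopA (messages : List (List (String × Option String))) (target : String) : List Int → Int
  | [] => -1
  | idx :: rest =>
      let current := pvNorm (PySem.List.pyGetD messages idx [])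
      if current == target then idx else pvLoopA messages target rest

def find_latest_speaker_index_py (messages : List (List (String × Option String))) (speaker : String) : Int :=
  let target := PySem.Str.lower (PySem.Str.strip speaker)
  if target == "" then -1
  else pvLoopA messages target (PySem.List.pyRange ((messages.length : Int) - 1) (-1) (-1))

-- ===== PORT B =====
def find_latest_speaker_index_py_alt (messages : List (List (String × Option String))) (speaker : String) : Int :=
  let target := PySem.Str.lower (PySem.Str.strip speaker)
  if target == "" then -1
  else (PySem.List.enumerate messages 0).foldl
      (fun result p => if pvNorm p.2 == target then p.1 else result) (-1)

-- ===== PRECONDITION & SPEC =====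
def Spec_find_latest_speaker_index_py (messages : List (List (String × Option String))) (speaker : String) (out : Int) : Prop := out = find_latest_speaker_index_py_alt messages speaker
instance (messages : List (List (String × Option String))) (speaker : String) (out : Int) : Decidable (Spec_find_latest_speaker_index_py messages speaker out) := by unfold Spec_find_latest_speaker_index_py; infer_instance

-- ===== CLAIM (what is proved, stated in full; the proofs are below) =====
def Claim_equal_find_latest_speaker_index_py : Prop := ∀ (messages : List (List (String × Option String))) (speaker : String), Dom_find_latest_speaker_index_py messages speaker → Spec_find_latest_speaker_index_py messages speaker (find_latest_speaker_index_py messages speaker)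

-- ===== LEMMAS AND PROOFS =====

-- indices that only touch the prefix see the same elements
theorem pvLoopA_append {messages : List (List (String × Option String))} {m : List (String × Option String)}
    (target : String) (idxs : List Int)
    (h : ∀ i ∈ idxs, 0 ≤ i ∧ i < (messages.length : Int)) :
    pvLoopA (messages ++ [m]) target idxs = pvLoopA messages target idxs := by
  induction idxs with
  | nil => rfl
  | cons i rest ih =>
      obtain ⟨h0, hlt⟩ := h i (List.mem_cons_self ..)
      have hget : PySem.List.pyGetD (messages ++ [m]) i ([] : List (String × Option String))
          = PySem.List.pyGetD messages i [] := by
        rw [PySem.List.pyGetD_eq_getElem (messages ++ [m]) [] h0 (by simp; omega),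
            PySem.List.pyGetD_eq_getElem messages [] h0 hlt]
        rw [List.getElem_append_left (by omega)]
      simp only [pvLoopA, hget]
      split
      · rfl
      · exact ih (fun j hj => h j (List.mem_cons_of_mem _ hj))

theorem pv_main (messages : List (List (String × Option String))) (target : String) :
    pvLoopA messages target (PySem.List.pyRange ((messages.length : Int) - 1) (-1) (-1))
      = (PySem.List.enumerate messages 0).foldl
          (fun result p => if pvNorm p.2 == target then p.1 else result) (-1) := by
  induction messages using List.reverseRecOn with
  | nil => rfl
  | append_singleton ms m ih =>
      have hlen : ((ms ++ [m]).length : Int) - 1 = (ms.length : Int) := by simp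
      rw [hlen, PySem.List.pyRange_neg_one_cons (by omega)]
      have hrange : ∀ i ∈ PySem.List.pyRange ((ms.length : Int) - 1) (-1) (-1),
          0 ≤ i ∧ i < (ms.length : Int) := by
        intro i hi
        rw [PySem.List.mem_pyRange_neg_one] at hi
        omega
      simp only [pvLoopA]
      have hget : PySem.List.pyGetD (ms ++ [m]) (ms.length : Int) ([] : List (String × Option String)) = m := by
        rw [PySem.List.pyGetD_eq_getElem (ms ++ [m]) [] (by omega) (by simp)]
        simp
      rw [hget, pvLoopA_append target _ hrange, ih,
          PySem.List.enumerate_append, List.foldl_append]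
      simp only [PySem.List.enumerate, List.foldl_cons, List.foldl_nil]
      split <;> simp_all


-- ===== VERDICT (by name: the statement is the Claim_ definition above) =====
theorem find_latest_speaker_index_py_spec : Claim_equal_find_latest_speaker_index_py := by
  intro messages speaker _
  unfold Spec_find_latest_speaker_index_py find_latest_speaker_index_py find_latest_speaker_index_py_alt
  dsimp only
  split
  · rfl
  · exact pv_main messages _
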